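-- pv_equiv track=rewrite | github.com/RF9862/MCQ_Scanner | main_mcq.py | loc_check
-- ===== SOURCE A (Python) =====
-- def loc_check(loc):
--     lim = 15
--     overcnt = 0
--     k = 0
--     for j in range(len(loc[0])):
--         try:
--             for i in range(j+1, len(loc[0])):
--
--                 if abs(loc[0][j]-loc[0][i]) < lim and abs(loc[1][j]-loc[1][i]) < lim:
--                     overcnt = overcnt + 1
--         except: pass
--     return len(loc[0]) - overcnt
-- ===== SOURCE B (Python) =====
-- def loc_check(loc):
--     lim = 15
--     pts = list(zip(loc[0], loc[1]))
--     grid = {}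
--     overcnt = 0
--     for (x, y) in pts:
--         cx, cy = x // lim, y // lim
--         for dx in (-1, 0, 1):
--             for dy in (-1, 0, 1):
--                 for (px, py) in grid.get((cx + dx, cy + dy), ()):
--                     if abs(x - px) < lim and abs(y - py) < lim:
--                         overcnt += 1
--         grid.setdefault((cx, cy), []).append((x, y))
--     return len(pts) - overcnt
-- ===== Notes on version B (the rewrite author's own statement) =====
-- stated objective: alternative
-- what changed: Replaced the all-pairs double loop over indices by a spatial-hash grid of cell size 15 that, for each point, counts close partners only among points stored in the 3x3 neighboring cells, one pass with a dict. Pre_ excludes ragged inputs (fewer than two rows, or a y-row shorter than the x-row), on which A's bare except silently swallows IndexErrors and truncates the count.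
-- outside the precondition, e.g. on loc_check([[0, 1], [0]]): A returns 2, B returns 1; on loc_check([[0, 1]]): A returns 2, B raises IndexError
import Mathlib
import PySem

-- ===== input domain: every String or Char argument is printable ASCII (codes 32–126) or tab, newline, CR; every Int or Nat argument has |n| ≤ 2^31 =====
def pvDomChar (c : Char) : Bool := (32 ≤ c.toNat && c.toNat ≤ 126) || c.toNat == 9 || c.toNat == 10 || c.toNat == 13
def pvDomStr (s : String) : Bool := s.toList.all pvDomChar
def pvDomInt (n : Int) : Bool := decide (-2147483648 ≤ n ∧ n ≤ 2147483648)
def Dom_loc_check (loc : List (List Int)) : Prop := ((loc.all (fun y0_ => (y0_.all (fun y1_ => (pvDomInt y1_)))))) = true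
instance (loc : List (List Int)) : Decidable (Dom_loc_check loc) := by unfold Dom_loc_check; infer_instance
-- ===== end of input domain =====

-- B replaces A's all-pairs double loop by a spatial-hash grid (cell size 15, 3x3 neighbor
-- lookup), one pass over the points (objective: alternative algorithm).

-- ===== PORT A =====
-- inner 'for i in range(j+1, n)' loop; the bare 'except: pass' catches the IndexError
-- raised by loc[1][j] / loc[1][i] (only evaluated when the x-test holds), aborting the loop
def locInnerA (xs ys : List Int) (j : Int) : List Int → Int → Int
  | [], acc => acc
  | i :: rest, acc =>
    if |PySem.List.pyGetD xs j 0 - PySem.List.pyGetD xs i 0| < 15 then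
      match PySem.List.pyGet? ys j, PySem.List.pyGet? ys i with
      | some yj, some yi =>
          if |yj - yi| < 15 then locInnerA xs ys j rest (acc + 1)
          else locInnerA xs ys j rest acc
      | _, _ => acc           -- IndexError caught by 'except: pass'
    else locInnerA xs ys j rest acc

def loc_check (loc : List (List Int)) : Int :=
  match PySem.List.pyGet? loc 0 with
  | none => 0                 -- loc[0] raises IndexError here (outside Pre_)
  | some xs =>
    let ys := (PySem.List.pyGet? loc 1).getD []   -- loc[1]; when missing, every access raises inside the try
    let overcnt := (PySem.List.pyRange 0 xs.length 1).foldl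
        (fun acc j => locInnerA xs ys j (PySem.List.pyRange (j + 1) xs.length 1) acc) 0
    (xs.length : Int) - overcnt

-- ===== PORT B =====
def cellKey (p : Int × Int) : Int × Int :=
  (PySem.Int.floordiv p.1 15, PySem.Int.floordiv p.2 15)

def cellOffsets : List (Int × Int) :=
  [(-1, -1), (-1, 0), (-1, 1), (0, -1), (0, 0), (0, 1), (1, -1), (1, 0), (1, 1)]

def loc_check_alt (loc : List (List Int)) : Int :=
  let xs := (PySem.List.pyGet? loc 0).getD []     -- loc[0]; raises for loc = [] (outside Pre_)
  let ys := (PySem.List.pyGet? loc 1).getD []     -- loc[1]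
  let pts := xs.zip ys
  let res := pts.foldl
    (fun (st : PySem.Dict (Int × Int) (List (Int × Int)) × Int) p =>
      let c := cellKey p
      let ov := cellOffsets.foldl
        (fun acc d =>
          ((st.1.getD (c.1 + d.1, c.2 + d.2) []).foldl
            (fun a q => if |p.1 - q.1| < 15 && |p.2 - q.2| < 15 then a + 1 else a) acc))
        st.2
      (st.1.modify c [] (· ++ [p]), ov))
    (PySem.Dict.empty, 0)
  (pts.length : Int) - res.2

-- ===== PRECONDITION & SPEC =====
-- Pre_ excludes ragged inputs (fewer than two rows, or a y-row shorter than the x-row), on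
-- which A's bare 'except: pass' silently swallows IndexErrors and truncates the count.
def Pre_loc_check (loc : List (List Int)) : Prop :=
  2 ≤ loc.length ∧ (loc.getD 0 []).length ≤ (loc.getD 1 []).length
instance (loc : List (List Int)) : Decidable (Pre_loc_check loc) := by
  unfold Pre_loc_check; infer_instance

def pvWitness_loc_check : List (List Int) := [[0, 3, 40], [0, 4, 40]]

def Spec_loc_check (loc : List (List Int)) (out : Int) : Prop := out = loc_check_alt loc
instance (loc : List (List Int)) (out : Int) : Decidable (Spec_loc_check loc out) := by
  unfold Spec_loc_check; infer_instance

-- ===== CLAIM (what is proved, stated in full; the proofs are below) =====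
def Claim_equal_loc_check : Prop :=
  ∀ (loc : List (List Int)), Dom_loc_check loc → Pre_loc_check loc →
    Spec_loc_check loc (loc_check loc)

-- ===== LEMMAS AND PROOFS =====

-- a pair of points is "close": both coordinates within 15
def closePt (p q : Int × Int) : Bool := |p.1 - q.1| < 15 && |p.2 - q.2| < 15

-- number of close unordered index pairs, scanning forward
def pairCnt : List (Int × Int) → Int
  | [] => 0
  | p :: rest => (rest.countP (closePt p) : Int) + pairCnt rest

theorem closePt_symm (p q : Int × Int) : closePt p q = closePt q p := by
  simp [closePt, abs_sub_comm]

theorem pairCnt_append_singleton (l : List (Int × Int)) (p : Int × Int) :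
    pairCnt (l ++ [p]) = pairCnt l + (l.countP (closePt p) : Int) := by
  induction l with
  | nil => simp [pairCnt]
  | cons q t ih =>
      simp only [List.cons_append, pairCnt, ih, List.countP_append, List.countP_cons]
      rw [closePt_symm q p]
      push_cast
      by_cases h : closePt p q = true <;> simp [h] <;> ring

-- ===== A-side: the double loop counts pairCnt =====

theorem innerA_spec (xs ys : List Int) (hlen : xs.length ≤ ys.length)
    (j : Nat) (hj : j < xs.length) :
    ∀ (a : Nat) (acc : Int),
      locInnerA xs ys (j : Int) (PySem.List.pyRange (a : Int) xs.length 1) acc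
        = acc + (((xs.zip ys).drop a).countP (closePt (xs[j]'hj, ys[j]'(by omega))) : Int) := by
  have hzip : (xs.zip ys).length = xs.length := by
    simp [List.length_zip]; omega
  suffices H : ∀ (k a : Nat) (acc : Int), xs.length - a = k →
      locInnerA xs ys (j : Int) (PySem.List.pyRange (a : Int) xs.length 1) acc
        = acc + (((xs.zip ys).drop a).countP (closePt (xs[j]'hj, ys[j]'(by omega))) : Int) by
    intro a acc; exact H _ a acc rfl
  intro k
  induction k with
  | zero =>
    intro a acc hk
    rw [PySem.List.pyRange_one_eq_nil (by exact_mod_cast Nat.le_of_sub_eq_zero hk)]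
    rw [List.drop_eq_nil_of_le (by omega)]
    simp [locInnerA]
  | succ k ih =>
    intro a acc hk
    have ha : a < xs.length := by omega
    have hay : a < ys.length := by omega
    rw [PySem.List.pyRange_one_cons (by exact_mod_cast ha)]
    have hcast : ((a : Int) + 1) = ((a + 1 : Nat) : Int) := by push_cast; ring
    have g1 : PySem.List.pyGetD xs (j : Int) 0 = xs[j] := by
      simp [List.getD_eq_getElem?_getD, List.getElem?_eq_getElem hj]
    have g2 : PySem.List.pyGetD xs (a : Int) 0 = xs[a] := by
      simp [List.getD_eq_getElem?_getD, List.getElem?_eq_getElem ha]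
    have g3 : PySem.List.pyGet? ys (j : Int) = some (ys[j]'(by omega)) := by
      simp [List.getElem?_eq_getElem (show j < ys.length by omega)]
    have g4 : PySem.List.pyGet? ys (a : Int) = some (ys[a]'hay) := by
      simp [List.getElem?_eq_getElem hay]
    have hdrop : (xs.zip ys).drop a
        = (xs[a], ys[a]'hay) :: (xs.zip ys).drop (a + 1) := by
      rw [List.drop_eq_getElem_cons (by omega)]
      simp
    have hrec : ∀ acc2 : Int, locInnerA xs ys (j : Int) (PySem.List.pyRange ((a + 1 : Nat) : Int) xs.length 1) acc2 = acc2 + (((xs.zip ys).drop (a + 1)).countP (closePt (xs[j]'hj, ys[j]'(by omega))) : Int) := fun acc2 => ih (a + 1) acc2 (by omega)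
    by_cases hx : |xs[j] - xs[a]| < 15
    · by_cases hy : |ys[j]'(by omega) - ys[a]'hay| < 15
      · simp only [locInnerA, g1, g2, g3, g4, hx, if_true, hy]
        rw [hcast, hrec (acc + 1) , hdrop]
        simp only [List.countP_cons]
        simp [closePt, hx, hy]
        omega
      · simp only [locInnerA, g1, g2, g3, g4, hx, if_true, hy, if_false]
        rw [hcast, hrec acc, hdrop]
        simp [closePt, hx, hy]
    · simp only [locInnerA, g1, g2, g3, g4, hx, if_false]
      rw [hcast, hrec acc, hdrop]
      simp [closePt, hx]

theorem outerA_spec (xs ys : List Int) (hlen : xs.length ≤ ys.length) :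
    ∀ (a : Nat) (acc : Int),
      (PySem.List.pyRange (a : Int) xs.length 1).foldl
        (fun acc j => locInnerA xs ys j (PySem.List.pyRange (j + 1) xs.length 1) acc) acc
        = acc + pairCnt ((xs.zip ys).drop a) := by
  have hzip : (xs.zip ys).length = xs.length := by simp [List.length_zip]; omega
  suffices H : ∀ (k a : Nat) (acc : Int), xs.length - a = k →
      (PySem.List.pyRange (a : Int) xs.length 1).foldl
        (fun acc j => locInnerA xs ys j (PySem.List.pyRange (j + 1) xs.length 1) acc) acc
        = acc + pairCnt ((xs.zip ys).drop a) by
    intro a acc; exact H _ a acc rfl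
  intro k
  induction k with
  | zero =>
    intro a acc hk
    rw [PySem.List.pyRange_one_eq_nil (by exact_mod_cast Nat.le_of_sub_eq_zero hk),
        List.drop_eq_nil_of_le (by omega)]
    simp [pairCnt]
  | succ k ih =>
    intro a acc hk
    have ha : a < xs.length := by omega
    rw [PySem.List.pyRange_one_cons (by exact_mod_cast ha)]
    simp only [List.foldl_cons]
    have hcast : ((a : Int) + 1) = ((a + 1 : Nat) : Int) := by push_cast; ring
    rw [hcast, innerA_spec xs ys hlen a ha (a + 1) acc, ih (a + 1) _ (by omega),
        List.drop_eq_getElem_cons (show a < (xs.zip ys).length by omega)]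
    simp only [pairCnt, List.getElem_zip]
    omega

-- ===== B-side: the grid loop counts pairCnt =====

-- incremental pair count: each new point is checked against all previous points
def pairAdd : List (Int × Int) → List (Int × Int) → Int
  | _, [] => 0
  | prev, p :: rest => (prev.countP (closePt p) : Int) + pairAdd (prev ++ [p]) rest

theorem pairAdd_eq (pts : List (Int × Int)) :
    ∀ prev, pairAdd prev pts = pairCnt (prev ++ pts) - pairCnt prev := by
  induction pts with
  | nil => intro prev; simp [pairAdd]
  | cons p rest ih =>
      intro prev
      have h1 := pairCnt_append_singleton prev p
      have h2 := ih (prev ++ [p])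
      simp only [pairAdd, h2, List.append_assoc, List.cons_append, List.nil_append] at *
      omega

-- floor cells of close coordinates differ by at most 1
theorem cell_close (a b : Int) (h : |a - b| < 15) :
    PySem.Int.floordiv a 15 - 1 ≤ PySem.Int.floordiv b 15 ∧
    PySem.Int.floordiv b 15 ≤ PySem.Int.floordiv a 15 + 1 := by
  have ha := PySem.Int.floordiv_mul_add_mod a 15
  have hb := PySem.Int.floordiv_mul_add_mod b 15
  have ha1 := PySem.Int.mod_nonneg a (b := 15) (by omega)
  have ha2 := PySem.Int.mod_lt a (b := 15) (by omega)
  have hb1 := PySem.Int.mod_nonneg b (b := 15) (by omega)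
  have hb2 := PySem.Int.mod_lt b (b := 15) (by omega)
  rw [abs_lt] at h
  omega

-- each close point lies in exactly one of the 9 neighbor cells, so the per-cell counts sum up
theorem sum_filter_count (p : Int × Int) (prev : List (Int × Int)) :
    (cellOffsets.map (fun d =>
      ((prev.filter (fun q => cellKey q = ((cellKey p).1 + d.1, (cellKey p).2 + d.2))).countP
        (closePt p) : Int))).sum
      = (prev.countP (closePt p) : Int) := by
  induction prev with
  | nil => simp [cellOffsets]
  | cons q t ih =>
    by_cases hcl : closePt p q = true
    · have hx : (cellKey q).1 = (cellKey p).1 + -1 ∨ (cellKey q).1 = (cellKey p).1 ∨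
          (cellKey q).1 = (cellKey p).1 + 1 := by
        have h := cell_close p.1 q.1 (by simp [closePt] at hcl; exact_mod_cast hcl.1)
        simp only [cellKey] at h ⊢
        omega
      have hy : (cellKey q).2 = (cellKey p).2 + -1 ∨ (cellKey q).2 = (cellKey p).2 ∨
          (cellKey q).2 = (cellKey p).2 + 1 := by
        have h := cell_close p.2 q.2 (by simp [closePt] at hcl; exact_mod_cast hcl.2)
        simp only [cellKey] at h ⊢
        omega
      have e1 : ∀ x : Int, (x = x + -1) = False := fun x => eq_false (by omega)
      have e2 : ∀ x : Int, (x = x + 1) = False := fun x => eq_false (by omega)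
      have e3 : ∀ x : Int, (x + -1 = x) = False := fun x => eq_false (by omega)
      have e4 : ∀ x : Int, (x + 1 = x) = False := fun x => eq_false (by omega)
      have e5 : ∀ x : Int, (x + -1 = x + 1) = False := fun x => eq_false (by omega)
      have e6 : ∀ x : Int, (x + 1 = x + -1) = False := fun x => eq_false (by omega)
      simp only [cellOffsets, List.map_cons, List.map_nil, List.sum_cons, List.sum_nil,
        List.filter_cons, List.countP_cons, add_zero] at ih ⊢
      simp only [apply_ite (List.countP (closePt p)), List.countP_cons, hcl, if_true,
        Prod.ext_iff, decide_eq_true_eq] at ih ⊢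
      rcases hx with hx | hx | hx <;> rcases hy with hy | hy | hy <;>
        simp only [hx, hy, e1, e2, e3, e4, e5, e6, and_true, and_false, and_self, if_true,
          if_false] <;>
        omega
    · simp only [Bool.not_eq_true] at hcl
      simp only [cellOffsets, List.map_cons, List.map_nil, List.sum_cons, List.sum_nil,
        List.filter_cons, List.countP_cons, add_zero, hcl] at ih ⊢
      simp only [apply_ite (List.countP (closePt p)), List.countP_cons, hcl, Bool.false_eq_true,
        if_false, add_zero, ite_self]
      exact ih

-- summing close-counts over the 9 neighbor cells of cellKey p counts all close points
theorem neighbor_split (p : Int × Int) (prev : List (Int × Int)) (acc : Int) :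
    cellOffsets.foldl
      (fun acc d =>
        ((prev.filter (fun q => cellKey q = ((cellKey p).1 + d.1, (cellKey p).2 + d.2))).foldl
          (fun a q => if |p.1 - q.1| < 15 && |p.2 - q.2| < 15 then a + 1 else a) acc))
      acc
      = acc + (prev.countP (closePt p) : Int) := by
  have h1 : ∀ (l : List (Int × Int)) (a : Int),
      l.foldl (fun a q => if |p.1 - q.1| < 15 && |p.2 - q.2| < 15 then a + 1 else a) a
        = a + (l.countP (closePt p) : Int) := by
    intro l a
    exact PySem.List.foldl_if_add_one (closePt p) l a
  have h2 : cellOffsets.foldl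
      (fun acc d =>
        ((prev.filter (fun q => cellKey q = ((cellKey p).1 + d.1, (cellKey p).2 + d.2))).foldl
          (fun a q => if |p.1 - q.1| < 15 && |p.2 - q.2| < 15 then a + 1 else a) acc))
      acc
    = cellOffsets.foldl
      (fun acc d => acc +
        ((prev.filter (fun q => cellKey q = ((cellKey p).1 + d.1, (cellKey p).2 + d.2))).countP
          (closePt p) : Int))
      acc := PySem.List.foldl_congr_mem _ _ _ _ (fun a d _ => h1 _ a)
  rw [h2, PySem.List.foldl_add, sum_filter_count p prev]

theorem gridB_spec (pts : List (Int × Int)) :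
    ∀ (prev : List (Int × Int)) (g : PySem.Dict (Int × Int) (List (Int × Int))) (ov : Int),
      (∀ c, g.getD c [] = prev.filter (fun q => cellKey q = c)) →
      (pts.foldl
        (fun (st : PySem.Dict (Int × Int) (List (Int × Int)) × Int) p =>
          let c := cellKey p
          let ov := cellOffsets.foldl
            (fun acc d =>
              ((st.1.getD (c.1 + d.1, c.2 + d.2) []).foldl
                (fun a q => if |p.1 - q.1| < 15 && |p.2 - q.2| < 15 then a + 1 else a) acc))
            st.2
          (st.1.modify c [] (· ++ [p]), ov))
        (g, ov)).2
        = ov + pairAdd prev pts := by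
  induction pts with
  | nil =>
    intro prev g ov _
    simp [pairAdd]
  | cons p rest ih =>
    intro prev g ov h
    simp only [List.foldl_cons]
    have hov : cellOffsets.foldl
        (fun acc d =>
          ((g.getD ((cellKey p).1 + d.1, (cellKey p).2 + d.2) []).foldl
            (fun a q => if |p.1 - q.1| < 15 && |p.2 - q.2| < 15 then a + 1 else a) acc))
        ov
        = ov + (prev.countP (closePt p) : Int) := by
      have hc : ∀ (acc : Int) (d : Int × Int), d ∈ cellOffsets →
          ((g.getD ((cellKey p).1 + d.1, (cellKey p).2 + d.2) []).foldl
            (fun a q => if |p.1 - q.1| < 15 && |p.2 - q.2| < 15 then a + 1 else a) acc)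
          = ((prev.filter
              (fun q => cellKey q = ((cellKey p).1 + d.1, (cellKey p).2 + d.2))).foldl
            (fun a q => if |p.1 - q.1| < 15 && |p.2 - q.2| < 15 then a + 1 else a) acc) := by
        intro acc d _
        rw [h]
      rw [PySem.List.foldl_congr_mem _ _ _ _ hc]
      exact neighbor_split p prev ov
    have h' : ∀ c, (g.modify (cellKey p) [] (· ++ [p])).getD c []
        = (prev ++ [p]).filter (fun q => cellKey q = c) := by
      intro c
      rw [PySem.Dict.getD_modify, List.filter_append, h]
      by_cases hc : c = cellKey p
      · simp [hc]
      · have hc' : ¬ (cellKey p = c) := fun h2 => hc h2.symm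
        simp [hc, hc', h]
    rw [ih (prev ++ [p]) _ _ h']
    simp only [pairAdd]
    rw [hov]
    ring

-- ===== VERDICT (by name: the statement is the Claim_ definition above) =====
theorem loc_check_spec : Claim_equal_loc_check := by
  intro loc _ hpre
  unfold Spec_loc_check
  obtain ⟨hlen2, hxy⟩ := hpre
  cases loc with
  | nil => simp at hlen2
  | cons xs rest =>
    cases rest with
    | nil => simp at hlen2
    | cons ys t =>
      have hxy' : xs.length ≤ ys.length := by simpa using hxy
      have p0 : PySem.List.pyGet? (xs :: ys :: t) 0 = some xs :=
        PySem.List.pyGet?_zero_cons xs (ys :: t)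
      have p1 : PySem.List.pyGet? (xs :: ys :: t) 1 = some ys := by
        simp [PySem.List.pyGet?, PySem.List.pyIdx?]
      have hzip : (xs.zip ys).length = xs.length := by
        simp [List.length_zip]; omega
      have hA := outerA_spec xs ys hxy' 0 0
      simp only [Nat.cast_zero, List.drop_zero, zero_add] at hA
      have hB := gridB_spec (xs.zip ys) [] PySem.Dict.empty 0
        (by intro c; simp [PySem.Dict.getD_empty])
      have hPA : pairAdd [] (xs.zip ys) = pairCnt (xs.zip ys) := by
        rw [pairAdd_eq]
        simp [pairCnt]
      rw [hPA, zero_add] at hB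
      simp only [loc_check, loc_check_alt, p0, p1, Option.getD_some]
      rw [hA, hB, hzip]
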